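-- pv_equiv track=rewrite | github.com/zubair-ce07/testtt | runners_point/runners_point/spiders/runners_point_spider.py | get_skus
-- ===== SOURCE A (Python) =====
-- def get_skus(variants, item, sizes):
--     skus = {}
--
--     for size in sizes:
--         for variant in variants:
--             color = variant.split("_")[0]
--             skus[color + "_" + size] = {
--                 "currency": "EUR",
--                 "price": item["price"],
--                 "size": size,
--                 "color": color
--             }
--
--     return skus
-- ===== SOURCE B (Python) =====
-- def get_skus(variants, item, sizes):
--     colors = list(dict.fromkeys(v.split("_")[0] for v in variants))
--     return _merge(colors, item, sizes)
--
--
-- def _merge(colors, item, sizes):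
--     if not sizes:
--         return {}
--     s = sizes[0]
--     head = {c + "_" + s: {"currency": "EUR", "price": item["price"],
--                           "size": s, "color": c}
--             for c in colors}
--     return {**head, **_merge(colors, item, sizes[1:])}
-- ===== Notes on version B (the rewrite author's own statement) =====
-- stated objective: alternative
-- what changed: B replaces A's mutate-one-dict nested loops by a staged functional decomposition: it first builds the distinct-color table with dict.fromkeys, then recursively builds one immutable per-size dict and combines them back-to-front with Python's {**head, **rest} merge, instead of re-splitting every variant for every size and overwriting entries in a single mutated dict.
import Mathlib
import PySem

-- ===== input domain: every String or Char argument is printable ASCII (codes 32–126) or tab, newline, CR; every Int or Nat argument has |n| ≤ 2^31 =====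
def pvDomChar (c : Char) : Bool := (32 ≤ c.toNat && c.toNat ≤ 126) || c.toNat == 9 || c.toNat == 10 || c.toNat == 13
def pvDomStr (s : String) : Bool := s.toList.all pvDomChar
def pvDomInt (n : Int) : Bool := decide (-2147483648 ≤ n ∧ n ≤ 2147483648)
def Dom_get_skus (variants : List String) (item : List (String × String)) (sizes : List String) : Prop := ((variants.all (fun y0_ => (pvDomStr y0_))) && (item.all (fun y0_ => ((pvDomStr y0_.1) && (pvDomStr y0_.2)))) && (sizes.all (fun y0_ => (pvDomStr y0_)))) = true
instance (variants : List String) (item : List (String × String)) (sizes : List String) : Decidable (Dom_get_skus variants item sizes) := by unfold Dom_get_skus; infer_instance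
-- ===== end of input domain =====

-- B replaces A's mutate-one-dict nested loops by a dedup color table plus recursive
-- per-size dicts merged back-to-front; return values proved equal on Pre_.

-- ===== PORT A =====
-- variant.split("_")[0]  (split("_") is never empty, so [0] never raises)
def pvColor (v : String) : String := PySem.List.pyGetD ((PySem.Str.split? v "_").getD []) 0 ""

def get_skus (variants : List String) (item : List (String × String)) (sizes : List String) : List (String × List (String × String)) :=
  (sizes.foldl (fun skus size =>
    variants.foldl (fun skus variant =>
      let color := pvColor variant
      skus.insert (color ++ "_" ++ size)
        [("currency", "EUR"),
         ("price", (item.lookup "price").getD ""),  -- item["price"]; KeyError excluded by Pre_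
         ("size", size),
         ("color", color)]) skus)
    PySem.Dict.empty).items

-- ===== PORT B =====
-- _merge(colors, item, sizes): per-size dict comprehension, then {**head, **rest}
def pvMerge (colors : List String) (item : List (String × String)) : List String → PySem.Dict String (List (String × String))
  | [] => PySem.Dict.empty
  | s :: rest =>
    let head : PySem.Dict String (List (String × String)) :=
      colors.foldl (fun d c =>
        d.insert (c ++ "_" ++ s)
          [("currency", "EUR"),
           ("price", (item.lookup "price").getD ""),  -- item["price"]; KeyError excluded by Pre_
           ("size", s),
           ("color", c)]) PySem.Dict.empty
    PySem.Dict.update head (pvMerge colors item rest).items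

def get_skus_alt (variants : List String) (item : List (String × String)) (sizes : List String) : List (String × List (String × String)) :=
  let colors := PySem.List.dedup (variants.map (fun v => pvColor v))
  (pvMerge colors item sizes).items

-- ===== PRECONDITION & SPEC =====
-- A (and B) raise KeyError iff the entry-building code runs (both lists nonempty) and item lacks "price".
def Pre_get_skus (variants : List String) (item : List (String × String)) (sizes : List String) : Prop :=
  variants = [] ∨ sizes = [] ∨ (item.lookup "price").isSome = true
instance (variants : List String) (item : List (String × String)) (sizes : List String) : Decidable (Pre_get_skus variants item sizes) := by unfold Pre_get_skus; infer_instance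
def pvWitness_get_skus : List String × (List (String × String)) × List String := (["red_36", "blue_36", "red_37"], [("price", "49")], ["36", "37"])

def Spec_get_skus (variants : List String) (item : List (String × String)) (sizes : List String) (out : List (String × List (String × String))) : Prop := out = get_skus_alt variants item sizes
instance (variants : List String) (item : List (String × String)) (sizes : List String) (out : List (String × List (String × String))) : Decidable (Spec_get_skus variants item sizes out) := by unfold Spec_get_skus; infer_instance

-- ===== CLAIM (what is proved, stated in full; the proofs are below) =====
def Claim_equal_get_skus : Prop := ∀ (variants : List String) (item : List (String × String)) (sizes : List String), Dom_get_skus variants item sizes → Pre_get_skus variants item sizes → Spec_get_skus variants item sizes (get_skus variants item sizes)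

-- ===== LEMMAS AND PROOFS =====

-- 'd updated by dict X' = re-inserting X's items into d
def pvUpd {V : Type} (d X : PySem.Dict String V) : PySem.Dict String V :=
  X.items.foldl (fun d p => d.insert p.1 p.2) d

-- appending the same suffix is cancellable, so keys 'c ++ "_" ++ size' are injective in the color for a fixed size
theorem pv_key_inj (size c c' : String) (h : c ++ "_" ++ size = c' ++ "_" ++ size) : c = c' := by
  have h2 : c.toList ++ ("_" ++ size).toList = c'.toList ++ ("_" ++ size).toList := by
    simpa [String.toList_append] using congrArg String.toList h
  exact String.toList_inj.1 (List.append_cancel_right h2)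

-- replacing the (unique) entry at key k by its own value is the identity
theorem pv_map_replace_id {V : Type} (k : String) (v : V) :
    ∀ (l : List (String × V)), (l.map Prod.fst).Nodup → (k, v) ∈ l →
      l.map (fun p => if p.1 == k then (k, v) else p) = l := by
  intro l
  induction l with
  | nil => intro _ h; cases h
  | cons p t ih =>
    intro hnd hm
    simp only [List.map_cons, List.nodup_cons] at hnd ⊢
    rcases List.mem_cons.1 hm with hp | ht
    · subst hp
      simp only [beq_self_eq_true, if_pos]
      congr 1
      have hk : ∀ q ∈ t, ¬ (q.1 == k) = true := by
        intro q hq hqk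
        exact hnd.1 (by simpa [eq_of_beq hqk] using List.mem_map_of_mem (f := Prod.fst) hq)
      calc t.map (fun p => if p.1 == k then (k, v) else p)
          = t.map id := List.map_congr_left (fun q hq => by simp [hk q hq])
        _ = t := List.map_id t
    · have hpk : ¬ (p.1 == k) = true := by
        intro hpk
        exact hnd.1 (by simpa [eq_of_beq hpk] using List.mem_map_of_mem (f := Prod.fst) ht)
      simp only [hpk, if_neg, Bool.false_eq_true, not_false_eq_true]
      rw [ih hnd.2 ht]

-- inserting the value a key already holds is a no-op (keys unique)
theorem pv_insert_noop {V : Type} (d : PySem.Dict String V) (k : String) (v : V)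
    (hnd : d.keys.Nodup) (h : d.get? k = some v) : d.insert k v = d := by
  have hc : d.contains k = true := by
    rw [PySem.Dict.contains_eq_isSome_get?, h]; rfl
  apply PySem.Dict.ext
  rw [PySem.Dict.items_insert_of_contains d v hc]
  exact pv_map_replace_id k v d.items (by simpa [PySem.Dict.keys] using hnd)
    (PySem.Dict.mem_items_of_get?_eq_some d h)

-- after a fold of inserts, a key whose every occurrence carries value v still holds v
theorem pv_get_foldl {α V : Type} (key : α → String) (val : α → V) (k : String) (v : V) :
    ∀ (t : List α) (d : PySem.Dict String V), d.get? k = some v →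
      (∀ a ∈ t, key a = k → val a = v) →
      (t.foldl (fun d a => d.insert (key a) (val a)) d).get? k = some v := by
  intro t
  induction t with
  | nil => intro d hd _; exact hd
  | cons b t ih =>
    intro d hd ht
    simp only [List.foldl_cons]
    apply ih
    · by_cases hbk : key b = k
      · rw [hbk, PySem.Dict.get?_insert_self, ht b (List.mem_cons_self) hbk]
      · rw [PySem.Dict.get?_insert_of_ne _ _ (fun h => hbk h.symm), hd]
    · exact fun a ha => ht a (List.mem_cons_of_mem _ ha)

-- a member's key holds its value after the fold (keys injective on the list)
theorem pv_get_foldl_mem {α V : Type} [DecidableEq α] (key : α → String) (val : α → V) :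
    ∀ (l : List α) (d : PySem.Dict String V) (x : α), x ∈ l →
      (∀ a ∈ l, key a = key x → a = x) →
      (l.foldl (fun d a => d.insert (key a) (val a)) d).get? (key x) = some (val x) := by
  intro l
  induction l with
  | nil => intro d x hx; cases hx
  | cons b t ih =>
    intro d x hx hinj
    simp only [List.foldl_cons]
    by_cases hxt : x ∈ t
    · exact ih _ x hxt (fun a ha h => hinj a (List.mem_cons_of_mem _ ha) h)
    · have hbx : b = x := by
        rcases List.mem_cons.1 hx with h | h
        · exact h.symm
        · exact absurd h hxt
      subst hbx
      apply pv_get_foldl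
      · exact PySem.Dict.get?_insert_self _ _ _
      · intro a ha h
        rw [hinj a (List.mem_cons_of_mem _ ha) h]

-- a fold of inserts with keys injective on the list equals the fold over its dedup
theorem pv_foldl_dedup {α V : Type} [DecidableEq α] (key : α → String) (val : α → V)
    (l : List α) (d : PySem.Dict String V) (hnd : d.keys.Nodup)
    (hinj : ∀ a ∈ l, ∀ b ∈ l, key a = key b → a = b) :
    l.foldl (fun d a => d.insert (key a) (val a)) d
      = (PySem.List.dedup l).foldl (fun d a => d.insert (key a) (val a)) d := by
  induction l using List.reverseRecOn with
  | nil => rfl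
  | append_singleton xs x ih =>
    have hinj' : ∀ a ∈ xs, ∀ b ∈ xs, key a = key b → a = b := fun a ha b hb h =>
      hinj a (List.mem_append_left _ ha) b (List.mem_append_left _ hb) h
    rw [List.foldl_append, List.foldl_cons, List.foldl_nil]
    simp only [PySem.List.dedup_eq_ofList] at *
    rw [PySem.Set.ofList_append_singleton, PySem.Set.add_eq_ite]
    by_cases hx : x ∈ PySem.Set.ofList xs
    · rw [if_pos hx, ← ih hinj']
      have hxm : x ∈ xs := by
        have := PySem.List.mem_dedup (xs := xs) (x := x)
        simp only [PySem.List.dedup_eq_ofList] at this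
        exact this.1 hx
      apply pv_insert_noop
      · exact PySem.Dict.nodup_keys_foldl_insert_key xs key (fun _ a => val a) d hnd
      · exact pv_get_foldl_mem key val xs d x hxm
          (fun a ha h => hinj a (List.mem_append_left _ ha) x (List.mem_append_right _ (by simp)) h)
    · rw [if_neg hx, List.foldl_append, List.foldl_cons, List.foldl_nil, ih hinj']

-- inserting twice at the same key = inserting the final value once
theorem pv_insert_insert {V : Type} (d : PySem.Dict String V) (k : String) (w v : V) :
    (d.insert k w).insert k v = d.insert k v := by
  apply PySem.Dict.ext
  by_cases hc : d.contains k = true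
  · have hc1 : (d.insert k w).contains k = true := by
      simp
    rw [PySem.Dict.items_insert_of_contains _ _ hc1,
        PySem.Dict.items_insert_of_contains _ _ hc,
        PySem.Dict.items_insert_of_contains _ _ hc, List.map_map]
    apply List.map_congr_left
    intro p _
    by_cases hp : p.1 = k <;> simp [hp]
  · have hcf : d.contains k = false := by simpa using hc
    have hc1 : (d.insert k w).contains k = true := by simp
    rw [PySem.Dict.items_insert_of_contains _ _ hc1,
        PySem.Dict.items_insert_of_not_contains _ _ hcf,
        PySem.Dict.items_insert_of_not_contains _ _ hcf,
        List.map_append]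
    have hnm : ∀ p ∈ d.items, p.1 ≠ k := by
      intro p hp hpk
      exact hc ((PySem.Dict.contains_iff_mem_keys _ _).2 (by
        have := PySem.Dict.mem_keys_of_mem_items (d := d) (p := p) hp
        simpa [hpk] using this))
    have hid : d.items.map (fun p => if p.1 == k then (k, v) else p) = d.items :=
      (List.map_congr_left (fun p hp => by simp [hnm p hp])).trans (List.map_id _)
    rw [hid]
    simp

-- overwriting an EXISTING key commutes with inserting a different key
theorem pv_insert_comm {V : Type} (D : PySem.Dict String V) (k q : String) (v w : V)
    (hc : D.contains k = true) (hne : q ≠ k) :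
    (D.insert k v).insert q w = (D.insert q w).insert k v := by
  apply PySem.Dict.ext
  have hqk : ¬ (q == k) = true := by simpa using hne
  have hkq : ¬ (k == q) = true := by simpa using (fun h => hne h.symm)
  have h2 : (D.insert q w).contains k = true := by
    rw [PySem.Dict.contains_insert]
    simp [hc]
  by_cases hq : D.contains q = true
  · have h1 : (D.insert k v).contains q = true := by
      rw [PySem.Dict.contains_insert]
      simp [hq]
    rw [PySem.Dict.items_insert_of_contains _ _ h1,
        PySem.Dict.items_insert_of_contains _ _ hc,
        PySem.Dict.items_insert_of_contains _ _ h2,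
        PySem.Dict.items_insert_of_contains _ _ hq, List.map_map, List.map_map]
    apply List.map_congr_left
    intro p _
    by_cases hp1 : p.1 = k
    · have hne' : k ≠ q := fun h => hne h.symm
      simp [hp1, hne']
    · by_cases hp2 : p.1 = q <;> simp [hp1, hp2, hne]
  · have h1 : (D.insert k v).contains q = false := by
      rw [PySem.Dict.contains_insert]
      simp [hqk]
      simpa using hq
    rw [PySem.Dict.items_insert_of_not_contains _ _ h1,
        PySem.Dict.items_insert_of_contains _ _ hc,
        PySem.Dict.items_insert_of_contains _ _ h2,
        PySem.Dict.items_insert_of_not_contains _ _ (by simpa using hq),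
        List.map_append]
    simp [hne]

-- overwriting key k at the end of a fold whose pairs avoid k = overwriting it at the start
theorem pv_overwrite {V : Type} (k : String) :
    ∀ (l : List (String × V)), (∀ p ∈ l, p.1 ≠ k) →
      ∀ (d : PySem.Dict String V) (w v : V),
      (l.foldl (fun d p => d.insert p.1 p.2) (d.insert k w)).insert k v
        = l.foldl (fun d p => d.insert p.1 p.2) (d.insert k v) := by
  intro l
  induction l using List.reverseRecOn with
  | nil => intro _ d w v; exact pv_insert_insert d k w v
  | append_singleton t q ih =>
    intro hl d w v
    have hq : q.1 ≠ k := hl q (List.mem_append_right _ (by simp))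
    have ht : ∀ p ∈ t, p.1 ≠ k := fun p hp => hl p (List.mem_append_left _ hp)
    rw [List.foldl_append, List.foldl_cons, List.foldl_nil,
        List.foldl_append, List.foldl_cons, List.foldl_nil,
        ← pv_insert_comm _ k q.1 v q.2 ?_ hq, ih ht]
    -- k is a key of the accumulated dict
    have : k ∈ (t.foldl (fun d p => d.insert p.1 p.2) (d.insert k w)).keys := by
      have hk0 : k ∈ (d.insert k w).keys := (PySem.Dict.mem_keys_insert _ _ _ _).2 (Or.inl rfl)
      have := PySem.Dict.keys_foldl_insert_key (l := t) (key := Prod.fst)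
        (f := fun (_ : PySem.Dict String V) (p : String × V) => p.2) (d := d.insert k w)
      rw [this]
      exact (PySem.Set.mem_update _ _ _).2 (Or.inl hk0)
    exact (PySem.Dict.contains_iff_mem_keys _ _).2 this

-- the key step: pvUpd distributes over a single insert (X's keys unique)
theorem pv_upd_insert {V : Type} (d X : PySem.Dict String V) (k : String) (v : V)
    (hnd : X.keys.Nodup) :
    pvUpd d (X.insert k v) = (pvUpd d X).insert k v := by
  unfold pvUpd
  by_cases hc : X.contains k = true
  · -- k occurs once in X.items; replacing its value in place
    obtain ⟨w, hw⟩ : ∃ w, X.get? k = some w := by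
      have := PySem.Dict.contains_eq_isSome_get? (d := X) (k := k)
      rw [hc] at this
      exact Option.isSome_iff_exists.1 this.symm
    obtain ⟨l1, l2, hX⟩ := List.append_of_mem (PySem.Dict.mem_items_of_get?_eq_some X hw)
    have hndX : (X.items.map Prod.fst).Nodup := by simpa [PySem.Dict.keys] using hnd
    rw [hX] at hndX
    simp only [List.map_append, List.map_cons] at hndX
    have hnd' := hndX
    rw [List.nodup_append] at hnd'
    have hk1 : ∀ p ∈ l1, p.1 ≠ k := by
      intro p hp hpk
      exact hnd'.2.2 p.1 (List.mem_map_of_mem (f := Prod.fst) hp) k (by simp) hpk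
    have hk2 : ∀ p ∈ l2, p.1 ≠ k := by
      intro p hp hpk
      have := hnd'.2.1
      rw [List.nodup_cons] at this
      exact this.1 (by simpa [hpk] using List.mem_map_of_mem (f := Prod.fst) hp)
    rw [PySem.Dict.items_insert_of_contains _ _ hc, hX]
    have hrepl : (l1 ++ (k, w) :: l2).map (fun p => if p.1 == k then (k, v) else p)
        = l1 ++ (k, v) :: l2 := by
      have m1 : l1.map (fun p => if p.1 == k then (k, v) else p) = l1 :=
        (List.map_congr_left (fun p hp => by simp [hk1 p hp])).trans (List.map_id _)
      have m2 : l2.map (fun p => if p.1 == k then (k, v) else p) = l2 :=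
        (List.map_congr_left (fun p hp => by simp [hk2 p hp])).trans (List.map_id _)
      rw [List.map_append, List.map_cons, m1, m2]
      simp
    rw [hrepl]
    simp only [List.foldl_append, List.foldl_cons]
    exact (pv_overwrite k l2 hk2 (l1.foldl (fun d p => d.insert p.1 p.2) d) w v).symm
  · rw [PySem.Dict.items_insert_of_not_contains _ _ (by simpa using hc), List.foldl_append]
    simp

-- folding pair-inserts commutes with pvUpd
theorem pv_foldl_upd {V : Type} :
    ∀ (ps : List (String × V)) (d X : PySem.Dict String V), X.keys.Nodup →
      ps.foldl (fun d p => d.insert p.1 p.2) (pvUpd d X)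
        = pvUpd d (ps.foldl (fun d p => d.insert p.1 p.2) X) := by
  intro ps
  induction ps with
  | nil => intro d X _; rfl
  | cons p t ih =>
    intro d X hnd
    simp only [List.foldl_cons]
    rw [← pv_upd_insert d X p.1 p.2 hnd]
    exact ih d (X.insert p.1 p.2)
      (by
        have := PySem.Dict.nodup_keys_insert (d := X) (k := p.1) (v := p.2)
        exact this hnd)

-- re-inserting a dict's own items into the empty dict rebuilds it
theorem pv_upd_empty {V : Type} (X : PySem.Dict String V) (hnd : X.keys.Nodup) :
    pvUpd PySem.Dict.empty X = X := by
  unfold pvUpd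
  apply PySem.Dict.ext
  rw [show (fun (d : PySem.Dict String V) (p : String × V) => d.insert p.1 p.2)
        = (fun d p => d.insert (Prod.fst p) (Prod.snd p)) from rfl,
      PySem.Dict.items_foldl_insert_fresh X.items Prod.fst Prod.snd PySem.Dict.empty
        (fun a _ => PySem.Dict.contains_empty _) (by simpa [PySem.Dict.keys] using hnd)]
  simp
  rfl

theorem pv_merge_nodup (colors : List String) (item : List (String × String)) :
    ∀ (ss : List String), (pvMerge colors item ss).keys.Nodup := by
  intro ss
  induction ss with
  | nil => simp [pvMerge, PySem.Dict.keys_empty]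
  | cons s rest ih =>
    show ((pvMerge colors item rest).items.foldl (fun (d : PySem.Dict String (List (String × String))) (p : String × List (String × String)) => d.insert p.1 p.2) _).keys.Nodup
    rw [show (fun (d : PySem.Dict String (List (String × String))) (p : String × List (String × String)) => d.insert p.1 p.2)
        = (fun d p => d.insert (Prod.fst p) ((fun (_ : PySem.Dict String (List (String × String))) q => Prod.snd q) d p)) from rfl]
    apply PySem.Dict.nodup_keys_foldl_insert_key
    exact PySem.Dict.nodup_keys_foldl_insert_key _ _ _ _ (by simp [PySem.Dict.keys_empty])

theorem get_skus_spec : Claim_equal_get_skus := by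
  intro variants item sizes _ _
  unfold Spec_get_skus get_skus get_skus_alt
  congr 1
  -- generalized invariant: folding A's per-size passes onto d = d updated by B's merged dict
  suffices h : ∀ (ss : List String) (d : PySem.Dict String (List (String × String))), d.keys.Nodup →
      ss.foldl (fun skus size =>
        variants.foldl (fun skus variant =>
          skus.insert (pvColor variant ++ "_" ++ size)
            [("currency", "EUR"), ("price", (item.lookup "price").getD ""),
             ("size", size), ("color", pvColor variant)]) skus) d
      = pvUpd d (pvMerge (PySem.List.dedup (variants.map (fun v => pvColor v))) item ss) by
    rw [show (fun (skus : PySem.Dict String (List (String × String))) size =>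
          variants.foldl (fun skus variant =>
            skus.insert (pvColor variant ++ "_" ++ size)
              [("currency", "EUR"), ("price", (item.lookup "price").getD ""),
               ("size", size), ("color", pvColor variant)]) skus)
        = (fun skus size =>
          variants.foldl (fun skus variant =>
            let color := pvColor variant
            skus.insert (color ++ "_" ++ size)
              [("currency", "EUR"), ("price", (item.lookup "price").getD ""),
               ("size", size), ("color", color)]) skus) from rfl] at h
    rw [h sizes PySem.Dict.empty List.nodup_nil, pv_upd_empty _ (pv_merge_nodup _ _ _)]
  intro ss
  induction ss with
  | nil => intro d _; rfl
  | cons s rest ih =>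
    intro d hd
    simp only [List.foldl_cons]
    -- name the per-size value builder
    set colors := PySem.List.dedup (variants.map (fun v => pvColor v)) with hcolors
    have hhead_nodup : (colors.foldl (fun d c =>
        d.insert (c ++ "_" ++ s)
          [("currency", "EUR"), ("price", (item.lookup "price").getD ""),
           ("size", s), ("color", c)]) PySem.Dict.empty).keys.Nodup :=
      PySem.Dict.nodup_keys_foldl_insert_key _ _ _ _ (by simp [PySem.Dict.keys_empty])
    -- step 1: A's inner pass over variants from d  =  pvUpd d (B's head dict for s)
    have hstep : variants.foldl (fun skus variant =>
        skus.insert (pvColor variant ++ "_" ++ s)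
          [("currency", "EUR"), ("price", (item.lookup "price").getD ""),
           ("size", s), ("color", pvColor variant)]) d
        = pvUpd d (colors.foldl (fun d c =>
            d.insert (c ++ "_" ++ s)
              [("currency", "EUR"), ("price", (item.lookup "price").getD ""),
               ("size", s), ("color", c)]) PySem.Dict.empty) := by
      -- turn both folds into pair-list folds
      have hA : variants.foldl (fun skus variant =>
          skus.insert (pvColor variant ++ "_" ++ s)
            [("currency", "EUR"), ("price", (item.lookup "price").getD ""),
             ("size", s), ("color", pvColor variant)]) d
          = (variants.map (fun v => pvColor v)).foldl (fun skus c =>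
              skus.insert (c ++ "_" ++ s)
                [("currency", "EUR"), ("price", (item.lookup "price").getD ""),
                 ("size", s), ("color", c)]) d :=
        (List.foldl_map (f := fun v => pvColor v)
          (g := fun (skus : PySem.Dict String (List (String × String))) (c : String) =>
            skus.insert (c ++ "_" ++ s)
              [("currency", "EUR"), ("price", (item.lookup "price").getD ""),
               ("size", s), ("color", c)])).symm
      rw [hA,
          pv_foldl_dedup (fun c => c ++ "_" ++ s)
            (fun c => [("currency", "EUR"), ("price", (item.lookup "price").getD ""),
                       ("size", s), ("color", c)])
            (variants.map (fun v => pvColor v)) d hd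
            (fun a _ b _ h => pv_key_inj s a b h),
          ← hcolors]
      -- now: colors.foldl ins_s d = pvUpd d (colors.foldl ins_s empty); via pair lists and pv_foldl_upd
      have hpair : ∀ (e : PySem.Dict String (List (String × String))),
          colors.foldl (fun d c =>
            d.insert (c ++ "_" ++ s)
              [("currency", "EUR"), ("price", (item.lookup "price").getD ""),
               ("size", s), ("color", c)]) e
          = (colors.map (fun c => (c ++ "_" ++ s,
              [("currency", "EUR"), ("price", (item.lookup "price").getD ""),
               ("size", s), ("color", c)]))).foldl (fun d p => d.insert p.1 p.2) e := by
        intro e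
        rw [List.foldl_map]
      rw [hpair d, hpair PySem.Dict.empty]
      exact pv_foldl_upd _ d PySem.Dict.empty (by exact List.nodup_nil)
    have hd' : (pvUpd d (colors.foldl (fun d c =>
        d.insert (c ++ "_" ++ s)
          [("currency", "EUR"), ("price", (item.lookup "price").getD ""),
           ("size", s), ("color", c)]) PySem.Dict.empty)).keys.Nodup := by
      unfold pvUpd
      rw [show (fun (d : PySem.Dict String (List (String × String))) (p : String × List (String × String)) => d.insert p.1 p.2)
          = (fun d p => d.insert (Prod.fst p) ((fun (_ : PySem.Dict String (List (String × String))) q => Prod.snd q) d p)) from rfl]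
      exact PySem.Dict.nodup_keys_foldl_insert_key _ _ _ _ hd
    rw [hstep, ih (pvUpd d _) hd']
    -- step 2: associativity  pvUpd (pvUpd d H) Y = pvUpd d (pvUpd H Y)  via pv_foldl_upd
    show pvUpd (pvUpd d _) (pvMerge colors item rest) = pvUpd d (pvMerge colors item (s :: rest))
    rw [show pvMerge colors item (s :: rest)
        = pvUpd (colors.foldl (fun d c =>
            d.insert (c ++ "_" ++ s)
              [("currency", "EUR"), ("price", (item.lookup "price").getD ""),
               ("size", s), ("color", c)]) PySem.Dict.empty) (pvMerge colors item rest) from rfl]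
    exact pv_foldl_upd (pvMerge colors item rest).items d _ hhead_nodup
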